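-- pv_equiv track=rewrite | github.com/ALOHAALOHAALOJHA/FARFAN_MCDPP | scripts/enrich_inventory_epistemology_v4.py | infer_requires
-- ===== SOURCE A (Python) =====
-- from typing import Any, Final
--
-- def _norm(s: object) -> str:
--     return "" if s is None else str(s)
--
-- def _contains_any(haystack: str, needles: list[str]) -> bool:
--     h = haystack.lower()
--     return any(n.lower() in h for n in needles)
--
-- def infer_requires(parameters: list[dict[str, Any]]) -> list[str]:
--     requires: set[str] = set()
--     for p in parameters:
--         blob = f"{_norm(p.get('name'))} {_norm(p.get('type'))}".lower()
--         if _contains_any(blob, ["text", "raw_text"]):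
--             requires.add("raw_text")
--         if _contains_any(blob, ["observations", "facts", "extracted"]):
--             requires.add("raw_facts")
--         if _contains_any(blob, ["scores", "parameters", "inferences"]):
--             requires.add("inferences")
--         if _contains_any(blob, ["preprocesadometadata", "metadata"]):
--             requires.add("PreprocesadoMetadata")
--         if _contains_any(blob, ["constraints", "validations", "audit_results"]):
--             requires.add("validated_constraints")
--     return sorted(requires)
-- ===== SOURCE B (Python) =====
-- # Table-driven: rules listed in sorted-tag order, so the filtered tag list is already sorted.
-- _RULES = [
--     ("PreprocesadoMetadata", ["preprocesadometadata", "metadata"]),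
--     ("inferences", ["scores", "parameters", "inferences"]),
--     ("raw_facts", ["observations", "facts", "extracted"]),
--     ("raw_text", ["text", "raw_text"]),
--     ("validated_constraints", ["constraints", "validations", "audit_results"]),
-- ]
--
-- def _blob(p):
--     name = p.get("name")
--     typ = p.get("type")
--     return f"{'' if name is None else str(name)} {'' if typ is None else str(typ)}".lower()
--
-- def infer_requires(parameters):
--     blobs = [_blob(p) for p in parameters]
--     return [tag for tag, needles in _RULES
--             if any(n in b for b in blobs for n in needles)]
-- ===== Notes on version B (the rewrite author's own statement) =====
-- stated objective: simpler
-- what changed: Replaced the per-parameter loop that accumulates a set and sorts it at the end by a table of (tag, needles) rules already listed in sorted order, returning the filter of that table against the once-computed list of lowercased parameter blobs, so no set and no sort call are needed.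
import Mathlib
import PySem

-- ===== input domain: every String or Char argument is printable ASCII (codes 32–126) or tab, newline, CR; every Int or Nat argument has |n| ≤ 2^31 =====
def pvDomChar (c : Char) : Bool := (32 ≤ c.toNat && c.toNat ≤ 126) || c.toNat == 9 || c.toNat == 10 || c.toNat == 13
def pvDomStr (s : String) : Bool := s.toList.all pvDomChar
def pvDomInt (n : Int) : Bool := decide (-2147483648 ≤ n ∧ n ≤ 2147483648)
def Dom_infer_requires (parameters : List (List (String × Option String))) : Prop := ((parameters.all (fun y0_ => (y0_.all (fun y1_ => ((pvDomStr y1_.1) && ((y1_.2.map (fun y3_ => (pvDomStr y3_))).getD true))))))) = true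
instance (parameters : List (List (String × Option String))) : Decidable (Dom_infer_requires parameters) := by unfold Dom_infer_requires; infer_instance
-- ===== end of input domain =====

-- B replaces A's per-parameter set accumulation + final sort by a table of rules pre-listed in
-- sorted tag order, filtered once against the list of lowercased parameter blobs (objective: simpler).


-- ===== PORT A =====
-- _norm(p.get(k)): "" when the key is absent or its value is None, else the string itself
def pvNormA (v : Option (Option String)) : String :=
  match v with
  | some (some s) => s
  | _ => ""

-- _contains_any(haystack, needles)
def pvContainsAny (haystack : String) (needles : List String) : Bool :=
  needles.any (fun n => PySem.Str.isIn (PySem.Str.lower n) (PySem.Str.lower haystack))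

-- f"{_norm(p.get('name'))} {_norm(p.get('type'))}".lower()
def pvBlobA (p : List (String × Option String)) : String :=
  PySem.Str.lower (PySem.Str.join " "
    [pvNormA ((PySem.Dict.mk p).get? "name"), pvNormA ((PySem.Dict.mk p).get? "type")])

-- the body of A's loop: five independent membership checks adding tags to the set
def pvStepA (req : PySem.Set String) (p : List (String × Option String)) : PySem.Set String :=
  let blob := pvBlobA p
  let req := if pvContainsAny blob ["text", "raw_text"] then req.add "raw_text" else req
  let req := if pvContainsAny blob ["observations", "facts", "extracted"] then req.add "raw_facts" else req
  let req := if pvContainsAny blob ["scores", "parameters", "inferences"] then req.add "inferences" else req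
  let req := if pvContainsAny blob ["preprocesadometadata", "metadata"] then req.add "PreprocesadoMetadata" else req
  let req := if pvContainsAny blob ["constraints", "validations", "audit_results"] then req.add "validated_constraints" else req
  req

def infer_requires (parameters : List (List (String × Option String))) : List String :=
  PySem.List.sorted (parameters.foldl pvStepA PySem.Set.empty) (fun x => x) false

-- ===== PORT B =====
-- _RULES, in sorted tag order
def pvRulesB : List (String × List String) :=
  [("PreprocesadoMetadata", ["preprocesadometadata", "metadata"]),
   ("inferences", ["scores", "parameters", "inferences"]),
   ("raw_facts", ["observations", "facts", "extracted"]),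
   ("raw_text", ["text", "raw_text"]),
   ("validated_constraints", ["constraints", "validations", "audit_results"])]

-- _blob(p)
def pvBlobB (p : List (String × Option String)) : String :=
  PySem.Str.lower (PySem.Str.join " "
    [pvNormA ((PySem.Dict.mk p).get? "name"), pvNormA ((PySem.Dict.mk p).get? "type")])

def infer_requires_alt (parameters : List (List (String × Option String))) : List String :=
  let blobs := parameters.map pvBlobB
  (pvRulesB.filter (fun r => blobs.any (fun b => r.2.any (fun n => PySem.Str.isIn n b)))).map (·.1)

-- ===== PRECONDITION & SPEC =====
def Spec_infer_requires (parameters : List (List (String × Option String))) (out : List String) : Prop := out = infer_requires_alt parameters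
instance (parameters : List (List (String × Option String))) (out : List String) : Decidable (Spec_infer_requires parameters out) := by unfold Spec_infer_requires; infer_instance

-- ===== CLAIM (what is proved, stated in full; the proofs are below) =====
def Claim_equal_infer_requires : Prop := ∀ (parameters : List (List (String × Option String))), Dom_infer_requires parameters → Spec_infer_requires parameters (infer_requires parameters)

-- ===== LEMMAS AND PROOFS =====

theorem pvLowerChar_idem (c : Char) :
    PySem.Chars.lowerChar (PySem.Chars.lowerChar c) = PySem.Chars.lowerChar c := by
  simp only [PySem.Chars.lowerChar, PySem.Chars.isupper]
  by_cases h1 : 'A' ≤ c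
  · by_cases h2 : c ≤ 'Z'
    · simp only [h1, h2, decide_true, Bool.and_self, if_true]
      have hle : c.toNat ≤ 90 := Fin.mk_le_mk.mp (Char.le_def.mp h2)
      have hv : (c.toNat + 32).isValidChar := by left; omega
      have ht : (Char.ofNat (c.toNat + 32)).toNat = c.toNat + 32 := by
        rw [Char.toNat_ofNat, if_pos hv]
      have hge : 65 ≤ c.toNat := Fin.mk_le_mk.mp (Char.le_def.mp h1)
      have hnle : ¬ (Char.ofNat (c.toNat + 32) ≤ 'Z') := by
        intro hc
        have h3 : (Char.ofNat (c.toNat + 32)).toNat ≤ 90 := Fin.mk_le_mk.mp (Char.le_def.mp hc)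
        omega
      simp [hnle]
    · simp [h1, h2]
  · simp [h1]

theorem pvCharsLower_idem (l : List Char) :
    PySem.Chars.lower (PySem.Chars.lower l) = PySem.Chars.lower l := by
  simp only [PySem.Chars.lower, List.map_map]
  exact List.map_congr_left (fun c _ => pvLowerChar_idem c)

theorem pvStrLower_idem (s : String) :
    PySem.Str.lower (PySem.Str.lower s) = PySem.Str.lower s := by
  apply String.toList_inj.mp
  simp [pvCharsLower_idem]

-- pvHit t p: the tags A's loop body would add for parameter p, as a predicate on t
def pvHit (t : String) (p : List (String × Option String)) : Bool :=
  (t == "raw_text" && pvContainsAny (pvBlobA p) ["text", "raw_text"]) ||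
  (t == "raw_facts" && pvContainsAny (pvBlobA p) ["observations", "facts", "extracted"]) ||
  (t == "inferences" && pvContainsAny (pvBlobA p) ["scores", "parameters", "inferences"]) ||
  (t == "PreprocesadoMetadata" && pvContainsAny (pvBlobA p) ["preprocesadometadata", "metadata"]) ||
  (t == "validated_constraints" && pvContainsAny (pvBlobA p) ["constraints", "validations", "audit_results"])

theorem pvMem_stepA (s : PySem.Set String) (p : List (String × Option String)) (t : String) :
    t ∈ pvStepA s p ↔ t ∈ s ∨ pvHit t p = true := by
  unfold pvStepA pvHit
  dsimp only
  generalize pvContainsAny (pvBlobA p) ["text", "raw_text"] = c1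
  generalize pvContainsAny (pvBlobA p) ["observations", "facts", "extracted"] = c2
  generalize pvContainsAny (pvBlobA p) ["scores", "parameters", "inferences"] = c3
  generalize pvContainsAny (pvBlobA p) ["preprocesadometadata", "metadata"] = c4
  generalize pvContainsAny (pvBlobA p) ["constraints", "validations", "audit_results"] = c5
  cases c1 <;> cases c2 <;> cases c3 <;> cases c4 <;> cases c5 <;>
    simp [PySem.Set.mem_add, beq_iff_eq] <;> tauto

theorem pvNodup_stepA (s : PySem.Set String) (p : List (String × Option String))
    (h : s.Nodup) : (pvStepA s p).Nodup := by
  simp only [pvStepA]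
  split_ifs <;> (repeat first | exact h | apply PySem.Set.nodup_add)

theorem pvMem_foldA (ps : List (List (String × Option String))) (s : PySem.Set String) (t : String) :
    t ∈ ps.foldl pvStepA s ↔ t ∈ s ∨ ∃ p ∈ ps, pvHit t p = true := by
  induction ps generalizing s with
  | nil => simp
  | cons p ps ih =>
    simp only [List.foldl_cons, ih, pvMem_stepA, List.mem_cons]
    constructor
    · rintro ((h | h) | ⟨q, hq, hh⟩)
      · exact Or.inl h
      · exact Or.inr ⟨p, Or.inl rfl, h⟩
      · exact Or.inr ⟨q, Or.inr hq, hh⟩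
    · rintro (h | ⟨q, (rfl | hq), hh⟩)
      · exact Or.inl (Or.inl h)
      · exact Or.inl (Or.inr hh)
      · exact Or.inr ⟨q, hq, hh⟩

theorem pvNodup_foldA (ps : List (List (String × Option String))) (s : PySem.Set String)
    (h : s.Nodup) : (ps.foldl pvStepA s).Nodup := by
  induction ps generalizing s with
  | nil => exact h
  | cons p ps ih =>
    rw [List.foldl_cons]
    exact ih (pvStepA s p) (pvNodup_stepA s p h)

-- B's per-rule check, rewritten as a scan over the parameters with A's _contains_any
theorem pvCondB (ps : List (List (String × Option String))) (ns : List String)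
    (h : ∀ n ∈ ns, PySem.Str.lower n = n) :
    ((ps.map pvBlobB).any (fun b => ns.any (fun n => PySem.Str.isIn n b)))
      = ps.any (fun p => pvContainsAny (pvBlobA p) ns) := by
  have hlb : ∀ p, PySem.Str.lower (pvBlobA p) = pvBlobB p := by
    intro p; unfold pvBlobA pvBlobB; exact pvStrLower_idem _
  rw [Bool.eq_iff_iff]
  simp only [List.any_eq_true, List.mem_map, pvContainsAny]
  constructor
  · rintro ⟨b, ⟨p, hp, rfl⟩, n, hn, hin⟩
    refine ⟨p, hp, n, hn, ?_⟩
    rw [h n hn, hlb]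
    exact hin
  · rintro ⟨p, hp, n, hn, hin⟩
    refine ⟨pvBlobB p, ⟨p, hp, rfl⟩, n, hn, ?_⟩
    rw [h n hn, hlb] at hin
    exact hin

theorem pvExists_hit_iff (ps : List (List (String × Option String))) (t : String) :
    (∃ p ∈ ps, pvHit t p = true)
      ↔ ∃ r ∈ pvRulesB, ps.any (fun p => pvContainsAny (pvBlobA p) r.2) = true ∧ r.1 = t := by
  simp only [pvHit, Bool.or_eq_true, Bool.and_eq_true, beq_iff_eq, pvRulesB,
    List.mem_cons, List.not_mem_nil, or_false, List.any_eq_true]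
  constructor
  · rintro ⟨p, hp, h⟩
    rcases h with (((⟨ht, hc⟩ | ⟨ht, hc⟩) | ⟨ht, hc⟩) | ⟨ht, hc⟩) | ⟨ht, hc⟩
    · exact ⟨("raw_text", ["text", "raw_text"]),
        Or.inr (Or.inr (Or.inr (Or.inl rfl))), ⟨p, hp, hc⟩, ht.symm⟩
    · exact ⟨("raw_facts", ["observations", "facts", "extracted"]),
        Or.inr (Or.inr (Or.inl rfl)), ⟨p, hp, hc⟩, ht.symm⟩
    · exact ⟨("inferences", ["scores", "parameters", "inferences"]),
        Or.inr (Or.inl rfl), ⟨p, hp, hc⟩, ht.symm⟩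
    · exact ⟨("PreprocesadoMetadata", ["preprocesadometadata", "metadata"]),
        Or.inl rfl, ⟨p, hp, hc⟩, ht.symm⟩
    · exact ⟨("validated_constraints", ["constraints", "validations", "audit_results"]),
        Or.inr (Or.inr (Or.inr (Or.inr rfl))), ⟨p, hp, hc⟩, ht.symm⟩
  · rintro ⟨r, hr, ⟨p, hp, hc⟩, hrt⟩
    subst hrt
    refine ⟨p, hp, ?_⟩
    rcases hr with rfl | rfl | rfl | rfl | rfl
    · exact Or.inl (Or.inr ⟨rfl, hc⟩)
    · exact Or.inl (Or.inl (Or.inr ⟨rfl, hc⟩))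
    · exact Or.inl (Or.inl (Or.inl (Or.inr ⟨rfl, hc⟩)))
    · exact Or.inl (Or.inl (Or.inl (Or.inl ⟨rfl, hc⟩)))
    · exact Or.inr ⟨rfl, hc⟩

theorem pvRules_lt : (pvRulesB.map (·.1)).Pairwise (fun a b : String => a < b) := by
  have h : (((pvRulesB.map (·.1)).map String.toList).Pairwise (· < ·)) := by decide
  exact (List.pairwise_map.mp h).imp (fun hab => String.lt_iff_toList_lt.mpr hab)

theorem pvRules_nodup : (pvRulesB.map (·.1)).Nodup :=
  pvRules_lt.imp (fun hab => ne_of_lt hab)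

theorem pvLow : ∀ r ∈ pvRulesB, ∀ n ∈ r.2, PySem.Str.lower n = n := by decide

theorem pvMem_alt (ps : List (List (String × Option String))) (t : String) :
    t ∈ infer_requires_alt ps
      ↔ ∃ r ∈ pvRulesB, ps.any (fun p => pvContainsAny (pvBlobA p) r.2) = true ∧ r.1 = t := by
  simp only [infer_requires_alt, List.mem_map, List.mem_filter]
  constructor
  · rintro ⟨r, ⟨hr, hf⟩, ht⟩
    exact ⟨r, hr, by rw [← pvCondB ps r.2 (pvLow r hr)]; exact hf, ht⟩
  · rintro ⟨r, hr, hf, ht⟩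
    exact ⟨r, ⟨hr, by rw [pvCondB ps r.2 (pvLow r hr)]; exact hf⟩, ht⟩

theorem pvNodup_alt (ps : List (List (String × Option String))) :
    (infer_requires_alt ps).Nodup := by
  apply List.Nodup.sublist _ pvRules_nodup
  simp only [infer_requires_alt]
  exact List.filter_sublist.map _

theorem pvPairwise_alt (ps : List (List (String × Option String))) :
    (infer_requires_alt ps).Pairwise (fun a b : String => a < b) := by
  apply List.Pairwise.sublist _ pvRules_lt
  simp only [infer_requires_alt]
  exact List.filter_sublist.map _

theorem infer_requires_spec' (ps : List (List (String × Option String))) :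
    infer_requires ps = infer_requires_alt ps := by
  unfold infer_requires
  apply PySem.List.sorted_eq_of_perm_of_pairwise_lt
  · apply (List.perm_ext_iff_of_nodup (pvNodup_alt ps) (pvNodup_foldA ps _ (by simp [PySem.Set.empty]))).mpr
    intro t
    rw [pvMem_alt, pvMem_foldA, ← pvExists_hit_iff]
    simp [PySem.Set.empty]
  · exact pvPairwise_alt ps

-- ===== VERDICT (by name: the statement is the Claim_ definition above) =====
theorem infer_requires_spec : Claim_equal_infer_requires := by
  intro ps _
  exact infer_requires_spec' ps
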